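-- pv_equiv track=rewrite | github.com/threevoconsulting/immigrationconsulting | immigration_portal/mm_questionnaire/models/language_proficiency.py | _tef_to_clb
-- ===== SOURCE A (Python) =====
-- def _tef_to_clb(score, ability):
--     """Convert TEF Canada score to CLB level."""
--     if not score:
--         return 0
--
--     # TEF to CLB conversion tables
--     if ability == 'listening':
--         # TEF Listening: 0-360
--         conversion = [
--             (316, 10), (298, 9), (280, 8), (249, 7),
--             (217, 6), (181, 5), (145, 4),
--         ]
--     elif ability == 'reading':
--         # TEF Reading: 0-300
--         conversion = [
--             (263, 10), (248, 9), (233, 8), (207, 7),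
--             (181, 6), (151, 5), (121, 4),
--         ]
--     else:  # writing, speaking: 0-450
--         conversion = [
--             (393, 10), (371, 9), (349, 8), (310, 7),
--             (271, 6), (226, 5), (181, 4),
--         ]
--
--     for threshold, clb in conversion:
--         if score >= threshold:
--             return clb
--     return 0
-- ===== SOURCE B (Python) =====
-- # Ascending threshold tables; CLB = 3 + (number of thresholds met), found by binary search.
-- _TEF_THRESHOLDS = {
--     'listening': (145, 181, 217, 249, 280, 298, 316),
--     'reading':   (121, 151, 181, 207, 233, 248, 263),
-- }
-- _TEF_DEFAULT = (181, 226, 271, 310, 349, 371, 393)  # writing, speaking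
--
--
-- def _tef_to_clb(score, ability):
--     """Convert TEF Canada score to CLB level."""
--     if not score:
--         return 0
--     asc = _TEF_THRESHOLDS.get(ability, _TEF_DEFAULT)
--     # binary search for the number of thresholds <= score (bisect_right)
--     lo, hi = 0, len(asc)
--     while lo < hi:
--         mid = (lo + hi) // 2
--         if score >= asc[mid]:
--             lo = mid + 1
--         else:
--             hi = mid
--     return 3 + lo if lo else 0
-- ===== Notes on version B (the rewrite author's own statement) =====
-- stated objective: alternative
-- what changed: Replaces the descending first-match linear scan of (threshold, clb) pairs by a binary search over ascending thresholds that counts how many thresholds the score meets, then computes CLB by the closed form 3 + count (0 when count is 0).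
import Mathlib
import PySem

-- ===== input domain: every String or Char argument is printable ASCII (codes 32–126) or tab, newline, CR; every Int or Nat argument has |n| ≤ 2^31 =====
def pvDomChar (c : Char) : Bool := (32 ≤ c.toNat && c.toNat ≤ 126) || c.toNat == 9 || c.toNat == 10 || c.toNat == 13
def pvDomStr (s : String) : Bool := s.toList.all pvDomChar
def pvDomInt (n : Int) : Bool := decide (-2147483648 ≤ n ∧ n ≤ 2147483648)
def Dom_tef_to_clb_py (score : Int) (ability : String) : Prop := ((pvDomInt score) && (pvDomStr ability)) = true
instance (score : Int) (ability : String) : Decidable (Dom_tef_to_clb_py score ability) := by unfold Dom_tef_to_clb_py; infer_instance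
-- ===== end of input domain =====

-- B replaces A's descending first-match scan by a binary search over ascending thresholds
-- plus the closed form CLB = 3 + count; equal return values, alternative decomposition.

-- ===== PORT A =====
-- the 'for threshold, clb in conversion: if score >= threshold: return clb' loop
def pvScanA (score : Int) : List (Int × Int) → Int
  | [] => 0
  | (t, c) :: rest => if score ≥ t then c else pvScanA score rest

def tef_to_clb_py (score : Int) (ability : String) : Int :=
  if score = 0 then 0
  else
    let conversion : List (Int × Int) :=
      if ability == "listening" then
        [(316, 10), (298, 9), (280, 8), (249, 7), (217, 6), (181, 5), (145, 4)]
      else if ability == "reading" then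
        [(263, 10), (248, 9), (233, 8), (207, 7), (181, 6), (151, 5), (121, 4)]
      else
        [(393, 10), (371, 9), (349, 8), (310, 7), (271, 6), (226, 5), (181, 4)]
    pvScanA score conversion

-- ===== PORT B =====
-- termination helper for the while-loop port (cited in decreasing_by)
theorem pvMid_bounds (lo hi : Int) (h : lo < hi) :
    lo ≤ PySem.Int.floordiv (lo + hi) 2 ∧ PySem.Int.floordiv (lo + hi) 2 < hi := by
  rw [PySem.Int.floordiv_eq_ediv_of_pos (by omega)]
  omega

-- the 'while lo < hi' binary-search loop of Source B (indexing is always in range: 0 ≤ lo ≤ mid < hi ≤ len)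
def pvBSearch (score : Int) (asc : List Int) (lo hi : Int) : Int :=
  if h : lo < hi then
    let mid := PySem.Int.floordiv (lo + hi) 2
    if score ≥ PySem.List.pyGetD asc mid 0 then pvBSearch score asc (mid + 1) hi
    else pvBSearch score asc lo mid
  else lo
termination_by (hi - lo).toNat
decreasing_by
  · have := pvMid_bounds lo hi h; omega
  · have := pvMid_bounds lo hi h; omega

def tef_to_clb_py_alt (score : Int) (ability : String) : Int :=
  if score = 0 then 0
  else
    let asc : List Int :=
      if ability == "listening" then [145, 181, 217, 249, 280, 298, 316]
      else if ability == "reading" then [121, 151, 181, 207, 233, 248, 263]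
      else [181, 226, 271, 310, 349, 371, 393]
    let lo := pvBSearch score asc 0 (asc.length : Int)
    if lo ≠ 0 then 3 + lo else 0

-- ===== PRECONDITION & SPEC =====
def Spec_tef_to_clb_py (score : Int) (ability : String) (out : Int) : Prop := out = tef_to_clb_py_alt score ability
instance (score : Int) (ability : String) (out : Int) : Decidable (Spec_tef_to_clb_py score ability out) := by unfold Spec_tef_to_clb_py; infer_instance

-- ===== CLAIM =====
def Claim_equal_tef_to_clb_py : Prop := ∀ (score : Int) (ability : String), Dom_tef_to_clb_py score ability → Spec_tef_to_clb_py score ability (tef_to_clb_py score ability)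

-- ===== LEMMAS AND PROOFS =====
-- one unfolding of the while-loop (mid and mid+1 supplied as literals so rewrites chain)
theorem pvBSearch_step (score : Int) (asc : List Int) (lo hi mid mid1 : Int) (h : lo < hi)
    (hm : PySem.Int.floordiv (lo + hi) 2 = mid) (hm1 : mid + 1 = mid1) :
    pvBSearch score asc lo hi =
      if score ≥ PySem.List.pyGetD asc mid 0 then pvBSearch score asc mid1 hi
      else pvBSearch score asc lo mid := by
  conv_lhs => rw [pvBSearch]
  simp only [dif_pos h, hm, hm1]

theorem pvBSearch_base (score : Int) (asc : List Int) (lo hi : Int) (h : ¬ lo < hi) :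
    pvBSearch score asc lo hi = lo := by
  rw [pvBSearch]; simp [h]

-- fully evaluate the binary search over a sorted 7-element table
theorem pvBSearch_seven (score t1 t2 t3 t4 t5 t6 t7 : Int)
    (hs : t1 ≤ t2 ∧ t2 ≤ t3 ∧ t3 ≤ t4 ∧ t4 ≤ t5 ∧ t5 ≤ t6 ∧ t6 ≤ t7) :
    pvBSearch score [t1, t2, t3, t4, t5, t6, t7] 0 (([t1, t2, t3, t4, t5, t6, t7] : List Int).length : Int) =
      if score ≥ t7 then 7 else if score ≥ t6 then 6 else if score ≥ t5 then 5
      else if score ≥ t4 then 4 else if score ≥ t3 then 3 else if score ≥ t2 then 2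
      else if score ≥ t1 then 1 else 0 := by
  show pvBSearch score [t1, t2, t3, t4, t5, t6, t7] 0 7 = _
  rw [pvBSearch_step _ _ 0 7 3 4 (by decide) (by decide) (by decide),
      pvBSearch_step _ _ 4 7 5 6 (by decide) (by decide) (by decide),
      pvBSearch_step _ _ 6 7 6 7 (by decide) (by decide) (by decide),
      pvBSearch_base _ _ 7 7 (by decide),
      pvBSearch_base _ _ 6 6 (by decide),
      pvBSearch_step _ _ 4 5 4 5 (by decide) (by decide) (by decide),
      pvBSearch_base _ _ 5 5 (by decide),
      pvBSearch_base _ _ 4 4 (by decide),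
      pvBSearch_step _ _ 0 3 1 2 (by decide) (by decide) (by decide),
      pvBSearch_step _ _ 2 3 2 3 (by decide) (by decide) (by decide),
      pvBSearch_base _ _ 3 3 (by decide),
      pvBSearch_base _ _ 2 2 (by decide),
      pvBSearch_step _ _ 0 1 0 1 (by decide) (by decide) (by decide),
      pvBSearch_base _ _ 1 1 (by decide),
      pvBSearch_base _ _ 0 0 (by decide)]
  simp [PySem.List.pyGetD]
  obtain ⟨h12, h23, h34, h45, h56, h67⟩ := hs
  split_ifs <;> omega

set_option maxHeartbeats 1000000 in
theorem tef_to_clb_py_spec : Claim_equal_tef_to_clb_py := by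
  intro score ability _
  unfold Spec_tef_to_clb_py tef_to_clb_py tef_to_clb_py_alt
  by_cases hz : score = 0
  · simp [hz]
  · simp only [if_neg hz]
    by_cases h1 : ability == "listening" <;> by_cases h2 : ability == "reading" <;>
      simp only [Bool.not_eq_true] at h1 h2 <;>
      simp only [h1, h2, Bool.false_eq_true, if_true, if_false, pvScanA] <;>
      rw [pvBSearch_seven score _ _ _ _ _ _ _ (by norm_num)] <;>
      split_ifs <;> omega
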